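-- pv_equiv track=rewrite | github.com/GarrettXUPT/boolean_fuction | addDeg/nine_vras_search.py | shortTobinary
-- ===== SOURCE A (Python) =====
-- def shortTobinary(shortList):
--     binaryList = []
--     for i in range(60):
--         if i + 1 in shortList:
--             binaryList.append(1)
--         else:
--             binaryList.append(0)
--     return binaryList
-- ===== SOURCE B (Python) =====
-- def shortTobinary(shortList):
--     binaryList = [0] * 60
--     for p in shortList:
--         if 1 <= p <= 60:
--             binaryList[p - 1] = 1
--     return binaryList
-- ===== Notes on version B (the rewrite author's own statement) =====
-- stated objective: faster
-- what changed: Replaced the gather pass (membership test of i+1 in shortList for each of the 60 slots) by a scatter pass: allocate a 60-slot zero vector once and set slot p-1 for each in-range element p of shortList.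
import Mathlib
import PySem

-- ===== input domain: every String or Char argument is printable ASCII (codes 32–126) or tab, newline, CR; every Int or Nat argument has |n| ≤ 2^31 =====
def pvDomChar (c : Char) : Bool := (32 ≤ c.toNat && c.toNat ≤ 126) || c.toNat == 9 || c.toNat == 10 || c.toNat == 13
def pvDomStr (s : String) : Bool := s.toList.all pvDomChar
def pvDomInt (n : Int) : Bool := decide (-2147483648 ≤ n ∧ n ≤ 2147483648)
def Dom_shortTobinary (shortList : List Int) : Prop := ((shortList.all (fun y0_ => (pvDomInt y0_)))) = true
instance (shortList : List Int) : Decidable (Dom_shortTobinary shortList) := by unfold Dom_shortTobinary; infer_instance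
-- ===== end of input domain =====

-- B replaces A's gather pass (membership test per slot) by a scatter pass over shortList; simpler/faster, same value.

-- ===== PORT A =====
-- for i in range(60): append 1 if i+1 in shortList else 0
def shortTobinary (shortList : List Int) : List Int :=
  (PySem.List.pyRange 0 60 1).foldl
    (fun binaryList i => binaryList ++ [if (i + 1) ∈ shortList then 1 else 0]) []

-- ===== PORT B =====
-- binaryList = a 60-slot zero vector; for p in shortList: if 1 <= p <= 60: binaryList[p-1] = 1
-- (the guard makes p-1 a nonnegative in-range index, so List.set is exact here)
def shortTobinary_alt (shortList : List Int) : List Int :=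
  shortList.foldl
    (fun binaryList p => if 1 ≤ p ∧ p ≤ 60 then binaryList.set (p - 1).toNat 1 else binaryList)
    (List.replicate 60 0)

-- ===== PRECONDITION & SPEC =====
def Spec_shortTobinary (shortList : List Int) (out : List Int) : Prop := out = shortTobinary_alt shortList
instance (shortList : List Int) (out : List Int) : Decidable (Spec_shortTobinary shortList out) := by unfold Spec_shortTobinary; infer_instance

-- ===== CLAIM (what is proved, stated in full; the proofs are below) =====
def Claim_equal_shortTobinary : Prop := ∀ (shortList : List Int), Dom_shortTobinary shortList → Spec_shortTobinary shortList (shortTobinary shortList)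

-- ===== LEMMAS AND PROOFS =====

theorem foldl_append_map (f : Int → Int) (xs : List Int) (a : List Int) :
    xs.foldl (fun acc i => acc ++ [f i]) a = a ++ xs.map f := by
  induction xs generalizing a with
  | nil => simp
  | cons x xs ih => simp [List.foldl, ih]

theorem shortTobinary_eq_map (l : List Int) :
    shortTobinary l = (PySem.List.pyRange 0 60 1).map (fun i => if (i + 1) ∈ l then 1 else 0) := by
  unfold shortTobinary
  rw [foldl_append_map]
  simp

theorem alt_length (l : List Int) (v : List Int) :
    (l.foldl (fun b p => if 1 ≤ p ∧ p ≤ 60 then b.set (p - 1).toNat 1 else b) v).length = v.length := by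
  induction l generalizing v with
  | nil => rfl
  | cons p l ih =>
    simp only [List.foldl]
    split_ifs with h
    · rw [ih]; simp
    · exact ih v

theorem alt_getElem (l : List Int) (v : List Int) (hv : v.length = 60) (j : Nat) (hj : j < 60) :
    (l.foldl (fun b p => if 1 ≤ p ∧ p ≤ 60 then b.set (p - 1).toNat 1 else b) v)[j]'(by rw [alt_length, hv]; exact hj)
      = if ((j : Int) + 1) ∈ l then 1 else v[j]'(by omega) := by
  induction l generalizing v with
  | nil => simp
  | cons p l ih =>
    simp only [List.foldl]
    by_cases hp : 1 ≤ p ∧ p ≤ 60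
    · have hstep : (if 1 ≤ p ∧ p ≤ 60 then v.set (p - 1).toNat 1 else v) = v.set (p - 1).toNat 1 := if_pos hp
      simp only [hstep]
      rw [ih (v.set (p - 1).toNat 1) (by simp [hv])]
      by_cases hm : ((j : Int) + 1) ∈ l
      · simp [hm]
      · by_cases he : (j : Int) + 1 = p
        · have : (p - 1).toNat = j := by omega
          simp [he, this, List.mem_cons]
        · have hne : p.toNat - 1 ≠ j := by omega
          simp [he, hne, List.mem_cons, hm]
    · have hstep : (if 1 ≤ p ∧ p ≤ 60 then v.set (p - 1).toNat 1 else v) = v := if_neg hp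
      simp only [hstep]
      rw [ih v hv]
      have he : (j : Int) + 1 ≠ p := by omega
      simp [he, List.mem_cons]

-- ===== VERDICT (by name: the statement is the Claim_ definition above) =====
theorem shortTobinary_spec : Claim_equal_shortTobinary := by
  intro l _
  unfold Spec_shortTobinary shortTobinary_alt
  rw [shortTobinary_eq_map]
  apply List.ext_getElem
  · rw [alt_length]; simp [PySem.List.length_pyRange_one]
  · intro j h1 h2
    have hj : j < 60 := by simpa [PySem.List.length_pyRange_one] using h1
    rw [List.getElem_map, alt_getElem l _ (by simp) j hj,
        PySem.List.getElem_pyRange_one, List.getElem_replicate]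
    simp
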